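-- pv_equiv track=rewrite | github.com/CoderDevOp/ConXn | backend/app/social_store.py | _first_message_from_peer
-- ===== SOURCE A (Python) =====
-- def _first_message_from_peer(msgs: list, peer_id: str) -> str:
--     """Original ask / first inbound from the other participant (not viewer)."""
--     if not msgs:
--         return ""
--     pid = str(peer_id)
--     for m in msgs:
--         if str(m.get("from", "")) == pid:
--             return (m.get("body") or "").strip()
--     for m in msgs:
--         fid = str(m.get("from", ""))
--         if fid.startswith("student:") and pid.startswith("student:"):
--             return (m.get("body") or "").strip()
--     return (msgs[0].get("body") or "").strip()
-- ===== SOURCE B (Python) =====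
-- def _first_message_from_peer(msgs: list, peer_id: str) -> str:
--     """One full pass with two accumulators (no early return): first exact match
--     and first student-candidate are both recorded while scanning once."""
--     if not msgs:
--         return ""
--     pid = str(peer_id)
--     done = None
--     cand = None
--     for m in msgs:
--         if done is None:
--             fid = str(m.get("from", ""))
--             if fid == pid:
--                 done = m
--             elif cand is None and fid.startswith("student:") and pid.startswith("student:"):
--                 cand = m
--     chosen = done if done is not None else (cand if cand is not None else msgs[0])
--     return (chosen.get("body") or "").strip()
-- ===== Notes on version B (the rewrite author's own statement) =====
-- stated objective: simpler
-- what changed: Replaced A's two sequential full scans and early returns by a single fold-style pass that maintains two accumulators (first exact peer match, first student candidate) and picks the answer once after the loop.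
import Mathlib
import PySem

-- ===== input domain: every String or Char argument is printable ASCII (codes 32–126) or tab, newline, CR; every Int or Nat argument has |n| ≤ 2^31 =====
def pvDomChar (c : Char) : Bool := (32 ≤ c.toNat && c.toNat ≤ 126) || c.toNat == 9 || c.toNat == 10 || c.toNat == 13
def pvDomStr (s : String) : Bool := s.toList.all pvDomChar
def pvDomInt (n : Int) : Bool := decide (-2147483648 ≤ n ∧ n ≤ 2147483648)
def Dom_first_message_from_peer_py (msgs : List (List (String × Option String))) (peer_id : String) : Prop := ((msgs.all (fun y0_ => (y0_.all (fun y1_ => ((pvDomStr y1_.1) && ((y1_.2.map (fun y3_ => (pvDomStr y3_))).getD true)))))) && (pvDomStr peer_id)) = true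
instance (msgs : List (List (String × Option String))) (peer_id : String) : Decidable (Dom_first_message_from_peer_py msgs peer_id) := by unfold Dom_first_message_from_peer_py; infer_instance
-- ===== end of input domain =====

-- ===== PORT A =====
-- B does one fold-style pass with two accumulators instead of A's staged scans; objective: simpler.
-- dicts are association lists; lookup = first match (List.lookup)
def pvFrom (m : List (String × Option String)) : String :=
  match m.lookup "from" with
  | some (some s) => s          -- str of a string value
  | some none => "None"         -- str(None)
  | none => ""                  -- default ""
def pvBody (m : List (String × Option String)) : String :=
  PySem.Str.strip (match m.lookup "body" with
  | some (some s) => s          -- (s or "") = s (strip of "" equals strip of s when s empty)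
  | _ => "")                    -- None or missing -> ""
-- first for-loop of A: first m with str(m.get("from","")) == pid
def pvLoop1 : List (List (String × Option String)) → String → Option String
  | [], _ => none
  | m :: rest, pid => if pvFrom m == pid then some (pvBody m) else pvLoop1 rest pid
-- second for-loop of A: first m whose fid and pid both start with "student:"
def pvLoop2 : List (List (String × Option String)) → String → Option String
  | [], _ => none
  | m :: rest, pid =>
    if PySem.Str.startswith (pvFrom m) "student:" && PySem.Str.startswith pid "student:" then
      some (pvBody m)
    else pvLoop2 rest pid
def first_message_from_peer_py (msgs : List (List (String × Option String))) (peer_id : String) : String :=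
  match msgs with
  | [] => ""
  | m0 :: _ =>
    match pvLoop1 msgs peer_id with
    | some b => b
    | none =>
      match pvLoop2 msgs peer_id with
      | some b => b
      | none => pvBody m0

-- ===== PORT B =====
-- loop body of Source B: state is (done, cand), both Option message; a full pass, no early exit
def pvStep (pid : String) (st : Option (List (String × Option String)) × Option (List (String × Option String)))
    (m : List (String × Option String)) :
    Option (List (String × Option String)) × Option (List (String × Option String)) :=
  match st.1 with
  | some _ => st
  | none =>
    let fid : String := match m.lookup "from" with | some (some s) => s | some none => "None" | none => ""
    if fid == pid then (some m, st.2)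
    else match st.2 with
      | some _ => st
      | none =>
        if PySem.Str.startswith fid "student:" && PySem.Str.startswith pid "student:" then (none, some m)
        else st
def first_message_from_peer_py_alt (msgs : List (List (String × Option String))) (peer_id : String) : String :=
  match msgs with
  | [] => ""
  | m0 :: _ =>
    let st := msgs.foldl (pvStep peer_id) (none, none)
    let chosen := st.1.getD (st.2.getD m0)
    PySem.Str.strip (match chosen.lookup "body" with | some (some s) => s | _ => "")

-- ===== PRECONDITION & SPEC =====
def Spec_first_message_from_peer_py (msgs : List (List (String × Option String))) (peer_id : String) (out : String) : Prop := out = first_message_from_peer_py_alt msgs peer_id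
instance (msgs : List (List (String × Option String))) (peer_id : String) (out : String) : Decidable (Spec_first_message_from_peer_py msgs peer_id out) := by unfold Spec_first_message_from_peer_py; infer_instance

-- ===== CLAIM (what is proved, stated in full; the proofs are below) =====
def Claim_equal_first_message_from_peer_py : Prop := ∀ (msgs : List (List (String × Option String))) (peer_id : String), Dom_first_message_from_peer_py msgs peer_id → Spec_first_message_from_peer_py msgs peer_id (first_message_from_peer_py msgs peer_id)

-- ===== LEMMAS AND PROOFS =====
theorem pvStep_done (pid : String) (d : List (String × Option String))
    (cand : Option (List (String × Option String))) :
    ∀ rest : List (List (String × Option String)),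
      List.foldl (pvStep pid) (some d, cand) rest = (some d, cand)
  | [] => rfl
  | _ :: rest => pvStep_done pid d cand rest

theorem pvFold_eq (pid : String) (m0 : List (String × Option String)) :
    ∀ (rest : List (List (String × Option String))) (cand : Option (List (String × Option String))),
    pvBody (((List.foldl (pvStep pid) (none, cand) rest).1).getD
            (((List.foldl (pvStep pid) (none, cand) rest).2).getD m0)) =
      match pvLoop1 rest pid with
      | some b => b
      | none =>
        match cand with
        | some c => pvBody c
        | none =>
          match pvLoop2 rest pid with
          | some b => b
          | none => pvBody m0
  | [], cand => by cases cand <;> simp [pvLoop1, pvLoop2]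
  | m :: rest, cand => by
    have hfid : (match m.lookup "from" with
        | some (some s) => s | some none => "None" | none => "") = pvFrom m := rfl
    rw [List.foldl_cons]
    by_cases h1 : (pvFrom m == pid) = true
    · have hs : pvStep pid (none, cand) m = (some m, cand) := by
        simp [pvStep, hfid, h1]
      rw [hs, pvStep_done]
      cases cand <;> simp [pvLoop1, h1]
    · cases cand with
      | some c =>
        have hs : pvStep pid (none, some c) m = (none, some c) := by
          simp [pvStep, hfid, h1]
        rw [hs, pvFold_eq pid m0 rest (some c)]
        simp [pvLoop1, h1]
      | none =>
        by_cases h2 : PySem.Chars.startswith (pvFrom m).toList ['s','t','u','d','e','n','t',':'] = true ∧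
            PySem.Chars.startswith pid.toList ['s','t','u','d','e','n','t',':'] = true
        · have hs : pvStep pid (none, none) m = (none, some m) := by
            simp [pvStep, hfid, h1, h2]
          rw [hs, pvFold_eq pid m0 rest (some m)]
          simp [pvLoop1, pvLoop2, h1, h2]
        · have hs : pvStep pid (none, none) m = (none, none) := by
            simp [pvStep, hfid, h1, h2]
          rw [hs, pvFold_eq pid m0 rest none]
          simp [pvLoop1, pvLoop2, h1, h2]

-- ===== VERDICT (by name: the statement is the Claim_ definition above) =====
theorem first_message_from_peer_py_spec : Claim_equal_first_message_from_peer_py := by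
  intro msgs peer_id _
  unfold Spec_first_message_from_peer_py
  cases msgs with
  | nil => rfl
  | cons m0 rest =>
    have hb : ∀ c : List (String × Option String),
        PySem.Str.strip (match c.lookup "body" with | some (some s) => s | _ => "") = pvBody c :=
      fun _ => rfl
    simp only [first_message_from_peer_py, first_message_from_peer_py_alt]
    rw [hb, pvFold_eq]
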